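-- pv_equiv track=rewrite | github.com/chrisalexiuk-nvidia/NeMo-Curator | benchmarking/scripts/utils.py | _is_sample_suspicious
-- ===== SOURCE A (Python) =====
-- import itertools
--
-- _BUNCHING_RUN_THRESHOLD = 0.9  # per-sample: suspicious if longest run of one type > 90% of its count
--
-- _MIN_COUNT_FOR_BUNCHING = 2  # need at least 2 elements of a type to check for bunching
--
-- def _is_sample_suspicious(texts: list, images: list) -> bool:
--     """Return True if one type's elements are overly bunched (longest run > 90% of its total count)."""
--     sequence = [
--         "T" if t is not None else "I"
--         for t, img in zip(texts, images, strict=False)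
--         if t is not None or img is not None
--     ]
--     text_total = sequence.count("T")
--     image_total = len(sequence) - text_total
--     for type_char, total in (("T", text_total), ("I", image_total)):
--         if total < _MIN_COUNT_FOR_BUNCHING:
--             continue
--         max_run = max(
--             (sum(1 for _ in g) for ch, g in itertools.groupby(sequence) if ch == type_char),
--             default=0,
--         )
--         if max_run / total > _BUNCHING_RUN_THRESHOLD:
--             return True
--     return False
-- ===== SOURCE B (Python) =====
-- def _is_sample_suspicious(texts: list, images: list) -> bool:
--     """Single combined pass: run-length tracking over zip(texts, images), no groupby, no per-type rescans."""
--     prev = None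
--     run = 0
--     max_t = max_i = tot_t = tot_i = 0
--     for t, img in zip(texts, images):
--         if t is None and img is None:
--             continue
--         if t is not None:
--             run = run + 1 if prev == "T" else 1
--             prev = "T"
--             tot_t += 1
--             if run > max_t:
--                 max_t = run
--         else:
--             run = run + 1 if prev == "I" else 1
--             prev = "I"
--             tot_i += 1
--             if run > max_i:
--                 max_i = run
--     return (tot_t >= 2 and max_t * 10 > tot_t * 9) or (tot_i >= 2 and max_i * 10 > tot_i * 9)
-- ===== Notes on version B (the rewrite author's own statement) =====
-- stated objective: alternative
-- what changed: Replaced the build-a-sequence + groupby + two per-type max scans with one combined pass over zip(texts, images) that maintains the current run length and per-type run maxima and totals, deciding both types from that single state (and the float threshold test max_run/total > 0.9 is done exactly as max_run*10 > total*9).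
import Mathlib
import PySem

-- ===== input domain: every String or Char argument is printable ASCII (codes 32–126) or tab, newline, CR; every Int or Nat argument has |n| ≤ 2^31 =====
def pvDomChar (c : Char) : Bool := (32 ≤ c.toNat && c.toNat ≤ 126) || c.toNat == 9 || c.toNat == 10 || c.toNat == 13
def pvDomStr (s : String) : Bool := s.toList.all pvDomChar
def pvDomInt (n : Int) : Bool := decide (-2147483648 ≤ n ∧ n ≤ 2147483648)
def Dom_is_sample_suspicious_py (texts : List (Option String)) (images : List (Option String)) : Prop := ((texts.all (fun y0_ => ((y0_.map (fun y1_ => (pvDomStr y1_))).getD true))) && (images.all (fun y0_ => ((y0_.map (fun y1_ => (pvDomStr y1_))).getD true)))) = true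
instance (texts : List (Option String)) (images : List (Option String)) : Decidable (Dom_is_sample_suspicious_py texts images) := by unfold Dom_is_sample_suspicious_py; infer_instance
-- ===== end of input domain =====

-- B replaces A's sequence-building + itertools.groupby + per-type max scans by one combined
-- run-length pass over zip(texts, images); same return value, similar cost (objective: alternative).
-- Both ports render Python's float test 'max_run / total > 0.9' as the exact integer comparison
-- 10*max_run > 9*total, which agrees with the float comparison for the totals reachable here.


-- ===== PORT A =====
-- the list comprehension: keep pairs where not both are None, classify 'T'/'I'
def pvSeqA (texts : List (Option String)) (images : List (Option String)) : List Char :=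
  ((texts.zip images).filter (fun p => p.1.isSome || p.2.isSome)).map
    (fun p => if p.1.isSome then 'T' else 'I')

-- itertools.groupby(sequence): run-length groups, left to right with a pending (char, count)
def pvGroupGo (c : Char) (n : Nat) : List Char → List (Char × Nat)
  | [] => [(c, n)]
  | x :: xs => if x = c then pvGroupGo c (n + 1) xs else (c, n) :: pvGroupGo x 1 xs

def pvGroupRuns : List Char → List (Char × Nat)
  | [] => []
  | x :: xs => pvGroupGo x 1 xs

-- max((len(g) for ch, g in groupby(sequence) if ch == type_char), default=0)
def pvMaxRunA (c : Char) (s : List Char) : Nat :=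
  PySem.List.maxD (((pvGroupRuns s).filter (fun p => p.1 == c)).map Prod.snd) (fun y => y) 0

-- one body of A's for-loop; 'max_run / total > 0.9' ported exactly as 10*max_run > 9*total
def pvCheckA (c : Char) (total : Nat) (s : List Char) : Bool :=
  if total < 2 then false else decide (10 * pvMaxRunA c s > 9 * total)

def is_sample_suspicious_py (texts : List (Option String)) (images : List (Option String)) : Bool :=
  let s := pvSeqA texts images
  let text_total := s.count 'T'
  let image_total := s.length - text_total
  if pvCheckA 'T' text_total s then true
  else if pvCheckA 'I' image_total s then true
  else false

-- ===== PORT B =====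
-- B's loop body: state = (prev, run, max_t, max_i, tot_t, tot_i)
def pvAltStep (st : Option Char × Nat × Nat × Nat × Nat × Nat)
    (p : Option String × Option String) : Option Char × Nat × Nat × Nat × Nat × Nat :=
  match st, p with
  | (prev, run, maxT, maxI, totT, totI), (t, img) =>
    if t.isNone && img.isNone then (prev, run, maxT, maxI, totT, totI)
    else if t.isSome then
      let run' := if prev = some 'T' then run + 1 else 1
      (some 'T', run', if run' > maxT then run' else maxT, maxI, totT + 1, totI)
    else
      let run' := if prev = some 'I' then run + 1 else 1
      (some 'I', run', maxT, if run' > maxI then run' else maxI, totT, totI + 1)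

def is_sample_suspicious_py_alt (texts : List (Option String)) (images : List (Option String)) : Bool :=
  match (texts.zip images).foldl pvAltStep (none, 0, 0, 0, 0, 0) with
  | (_, _, maxT, maxI, totT, totI) =>
    (decide (totT ≥ 2) && decide (maxT * 10 > totT * 9)) ||
    (decide (totI ≥ 2) && decide (maxI * 10 > totI * 9))

-- ===== PRECONDITION & SPEC =====
def Spec_is_sample_suspicious_py (texts : List (Option String)) (images : List (Option String)) (out : Bool) : Prop := out = is_sample_suspicious_py_alt texts images
instance (texts : List (Option String)) (images : List (Option String)) (out : Bool) : Decidable (Spec_is_sample_suspicious_py texts images out) := by unfold Spec_is_sample_suspicious_py; infer_instance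

-- ===== CLAIM (what is proved, stated in full; the proofs are below) =====
def Claim_equal_is_sample_suspicious_py : Prop := ∀ (texts : List (Option String)) (images : List (Option String)), Dom_is_sample_suspicious_py texts images → Spec_is_sample_suspicious_py texts images (is_sample_suspicious_py texts images)

-- ===== LEMMAS AND PROOFS =====

-- proof-side: max run length of char c in s, given a pending run (prev, run)
def pvMr (prev : Option Char) (run : Nat) (c : Char) : List Char → Nat
  | [] => 0
  | x :: xs =>
    let run' := if prev = some x then run + 1 else 1
    Nat.max (if x = c then run' else 0) (pvMr (some x) run' c xs)

-- B's step, on the classified char alone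
def pvCharStep (st : Option Char × Nat × Nat × Nat × Nat × Nat) (c : Char) :
    Option Char × Nat × Nat × Nat × Nat × Nat :=
  match st with
  | (prev, run, maxT, maxI, totT, totI) =>
    if c = 'T' then
      let run' := if prev = some 'T' then run + 1 else 1
      (some 'T', run', if run' > maxT then run' else maxT, maxI, totT + 1, totI)
    else
      let run' := if prev = some 'I' then run + 1 else 1
      (some 'I', run', maxT, if run' > maxI then run' else maxI, totT, totI + 1)

lemma pvFoldl_alt_eq_charStep (l : List (Option String × Option String))
    (st : Option Char × Nat × Nat × Nat × Nat × Nat) :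
    l.foldl pvAltStep st =
      ((l.filter (fun p => p.1.isSome || p.2.isSome)).map
        (fun p => if p.1.isSome then 'T' else 'I')).foldl pvCharStep st := by
  induction l generalizing st with
  | nil => rfl
  | cons p l ih =>
    obtain ⟨t, img⟩ := p
    cases t <;> cases img <;>
      simp [pvAltStep, pvCharStep, List.filter, ih]

lemma pvMaxIte (a b m : Nat) :
    Nat.max (if b > a then b else a) m = Nat.max a (Nat.max b m) := by
  simp only [Nat.max_def]
  split_ifs <;> omega

lemma pvFoldl_charStep (s : List Char) (h : ∀ x ∈ s, x = 'T' ∨ x = 'I')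
    (prev : Option Char) (run maxT maxI totT totI : Nat) :
    ∃ p r, s.foldl pvCharStep (prev, run, maxT, maxI, totT, totI) =
      (p, r, Nat.max maxT (pvMr prev run 'T' s), Nat.max maxI (pvMr prev run 'I' s),
       totT + s.count 'T', totI + s.count 'I') := by
  induction s generalizing prev run maxT maxI totT totI with
  | nil => exact ⟨prev, run, by simp [pvMr]⟩
  | cons x s ih =>
    have hs : ∀ y ∈ s, y = 'T' ∨ y = 'I' := fun y hy => h y (List.mem_cons_of_mem _ hy)
    rcases h x List.mem_cons_self with hx | hx <;> subst hx
    · obtain ⟨p, r, heq⟩ := ih hs (some 'T')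
        (if prev = some 'T' then run + 1 else 1)
        (if (if prev = some 'T' then run + 1 else 1) > maxT
          then (if prev = some 'T' then run + 1 else 1) else maxT) maxI (totT + 1) totI
      refine ⟨p, r, ?_⟩
      rw [List.foldl_cons]
      have hstep : pvCharStep (prev, run, maxT, maxI, totT, totI) 'T' =
          (some 'T', (if prev = some 'T' then run + 1 else 1),
            (if (if prev = some 'T' then run + 1 else 1) > maxT
              then (if prev = some 'T' then run + 1 else 1) else maxT), maxI, totT + 1, totI) := by
        simp [pvCharStep]
      have hT : pvMr prev run 'T' ('T' :: s) =
          Nat.max (if prev = some 'T' then run + 1 else 1)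
            (pvMr (some 'T') (if prev = some 'T' then run + 1 else 1) 'T' s) := by
        simp [pvMr]
      have hI : pvMr prev run 'I' ('T' :: s) =
          pvMr (some 'T') (if prev = some 'T' then run + 1 else 1) 'I' s := by
        simp [pvMr]
      have hcT : List.count 'T' ('T' :: s) = List.count 'T' s + 1 := by
        simp
      have hcI : List.count 'I' ('T' :: s) = List.count 'I' s := by
        simp
      rw [hstep, heq, hT, hI, hcT, hcI, pvMaxIte]
      simp only [Prod.mk.injEq]
      and_intros <;> first | trivial | omega
    · obtain ⟨p, r, heq⟩ := ih hs (some 'I')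
        (if prev = some 'I' then run + 1 else 1) maxT
        (if (if prev = some 'I' then run + 1 else 1) > maxI
          then (if prev = some 'I' then run + 1 else 1) else maxI) totT (totI + 1)
      refine ⟨p, r, ?_⟩
      rw [List.foldl_cons]
      have hstep : pvCharStep (prev, run, maxT, maxI, totT, totI) 'I' =
          (some 'I', (if prev = some 'I' then run + 1 else 1), maxT,
            (if (if prev = some 'I' then run + 1 else 1) > maxI
              then (if prev = some 'I' then run + 1 else 1) else maxI), totT, totI + 1) := by
        simp [pvCharStep]
      have hT : pvMr prev run 'T' ('I' :: s) =
          pvMr (some 'I') (if prev = some 'I' then run + 1 else 1) 'T' s := by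
        simp [pvMr]
      have hI : pvMr prev run 'I' ('I' :: s) =
          Nat.max (if prev = some 'I' then run + 1 else 1)
            (pvMr (some 'I') (if prev = some 'I' then run + 1 else 1) 'I' s) := by
        simp [pvMr]
      have hcT : List.count 'T' ('I' :: s) = List.count 'T' s := by
        simp
      have hcI : List.count 'I' ('I' :: s) = List.count 'I' s + 1 := by
        simp
      rw [hstep, heq, hT, hI, hcT, hcI, pvMaxIte]
      simp only [Prod.mk.injEq]
      and_intros <;> first | trivial | omega

lemma pvGroupGo_max (c : Char) (xs : List Char) (c0 : Char) (n0 : Nat) :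
    (((pvGroupGo c0 n0 xs).filter (fun p => p.1 == c)).map Prod.snd).foldr Nat.max 0 =
      Nat.max (if c0 = c then n0 else 0) (pvMr (some c0) n0 c xs) := by
  induction xs generalizing c0 n0 with
  | nil =>
    by_cases hc : c0 = c <;>
      simp [pvGroupGo, pvMr, hc]
  | cons x xs ih =>
    by_cases hx : x = c0
    · subst hx
      have hgo : pvGroupGo x n0 (x :: xs) = pvGroupGo x (n0 + 1) xs := by
        simp [pvGroupGo]
      rw [hgo, ih]
      have hmr : pvMr (some x) n0 c (x :: xs) =
          Nat.max (if x = c then n0 + 1 else 0) (pvMr (some x) (n0 + 1) c xs) := by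
        simp [pvMr]
      rw [hmr]
      by_cases hc : x = c <;> simp only [hc, if_pos, Nat.max_def] <;>
        split_ifs <;> omega
    · have hgo : pvGroupGo c0 n0 (x :: xs) = (c0, n0) :: pvGroupGo x 1 xs := by
        simp [pvGroupGo, hx]
      have hmr : pvMr (some c0) n0 c (x :: xs) =
          Nat.max (if x = c then 1 else 0) (pvMr (some x) 1 c xs) := by
        have : (some c0 = some x) = False := by
          simp; exact fun hh => hx hh.symm
        simp [pvMr, this]
      rw [hgo, hmr]
      by_cases hc : c0 = c
      · simp only [List.filter_cons, hc, beq_self_eq_true, if_pos, List.map_cons,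
          List.foldr_cons, ih]
      · have hne : ((c0, n0).1 == c) = false := by simp [hc]
        simp only [List.filter_cons, hne, Bool.false_eq_true, if_false, ih]
        simp only [hc, if_false, Nat.max_def]
        split_ifs <;> omega

lemma pvMaxD_eq_foldr (l : List Nat) :
    PySem.List.maxD l (fun y => y) 0 = l.foldr Nat.max 0 := by
  have key : ∀ (t : List Nat) (x : Nat), t.foldl max x = Nat.max x (t.foldr Nat.max 0) := by
    intro t
    induction t with
    | nil => intro x; simp
    | cons y t ih =>
      intro x
      rw [List.foldl_cons, ih, List.foldr_cons]
      simp only [Nat.max_def]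
      split_ifs <;> omega
  cases l with
  | nil => rfl
  | cons x t =>
    simp only [PySem.List.maxD, PySem.List.max?_id_cons, Option.getD_some, List.foldr_cons]
    exact key t x

lemma pvMaxRunA_eq_mr (c : Char) (s : List Char) :
    pvMaxRunA c s = pvMr none 0 c s := by
  cases s with
  | nil => rfl
  | cons x xs =>
    have hmr : pvMr none 0 c (x :: xs) =
        Nat.max (if x = c then 1 else 0) (pvMr (some x) 1 c xs) := by
      simp [pvMr]
    simp only [pvMaxRunA, pvGroupRuns]
    rw [pvMaxD_eq_foldr, pvGroupGo_max, hmr]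

lemma pvSeq_mem (texts images : List (Option String)) :
    ∀ x ∈ pvSeqA texts images, x = 'T' ∨ x = 'I' := by
  intro x hx
  simp only [pvSeqA, List.mem_map] at hx
  obtain ⟨p, -, hp⟩ := hx
  split_ifs at hp <;> [exact Or.inl hp.symm; exact Or.inr hp.symm]

lemma pvCount_I (s : List Char) (h : ∀ x ∈ s, x = 'T' ∨ x = 'I') :
    s.count 'I' = s.length - s.count 'T' := by
  have key : s.count 'T' + s.count 'I' = s.length := by
    induction s with
    | nil => rfl
    | cons x s ih =>
      have hs : ∀ y ∈ s, y = 'T' ∨ y = 'I' := fun y hy => h y (List.mem_cons_of_mem _ hy)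
      have ihh := ih hs
      rcases h x List.mem_cons_self with hx | hx <;> subst hx <;>
        simp <;> omega
  omega

-- ===== VERDICT (by name: the statement is the Claim_ definition above) =====
theorem is_sample_suspicious_py_spec : Claim_equal_is_sample_suspicious_py := by
  intro texts images _
  unfold Spec_is_sample_suspicious_py is_sample_suspicious_py is_sample_suspicious_py_alt
  have hseq : ((texts.zip images).filter (fun p => p.1.isSome || p.2.isSome)).map
      (fun p => if p.1.isSome then 'T' else 'I') = pvSeqA texts images := rfl
  rw [pvFoldl_alt_eq_charStep, hseq]
  obtain ⟨p, r, heq⟩ :=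
    pvFoldl_charStep (pvSeqA texts images) (pvSeq_mem texts images) none 0 0 0 0 0
  rw [heq]
  have hI := pvCount_I (pvSeqA texts images) (pvSeq_mem texts images)
  simp only [pvCheckA, pvMaxRunA_eq_mr, hI, Nat.zero_max, Nat.zero_add]
  split_ifs <;> simp_all <;> omega
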